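-- pv_equiv track=rewrite | github.com/ARI3L99/EjerciciosPython | Clase12/comparaciones_ordenamiento.py | buscar_max
-- ===== SOURCE A (Python) =====
-- def buscar_max(lista, a, b):
--     """Devuelve la posición del máximo elemento en un segmento de
--        lista de elementos comparables.
--        La lista no debe ser vacía.
--        a y b son las posiciones inicial y final del segmento"""
--     contar = 0
--     pos_max = a
--     for i in range(a + 1, b + 1):
--         contar+= 1
--         if lista[i] > lista[pos_max]:
--             pos_max = i
--     return pos_max,contar
-- ===== SOURCE B (Python) =====
-- def buscar_max(lista, a, b):
--     """Divide-and-conquer: leftmost max position in lista[a..b], with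
--        comparison count b-a (n-1 comparisons for n elements)."""
--     if b < a:
--         return a, 0
--
--     def rec(lo, hi):
--         if lo == hi:
--             return lo, 0
--         mid = (lo + hi) // 2
--         lp, lc = rec(lo, mid)
--         rp, rc = rec(mid + 1, hi)
--         pos = rp if lista[rp] > lista[lp] else lp
--         return pos, lc + rc + 1
--
--     return rec(a, b)
-- ===== Notes on version B (the rewrite author's own statement) =====
-- stated objective: alternative
-- what changed: Replaced the single left-to-right scan carrying (pos_max, contar) by a divide-and-conquer recursion that splits the segment at its midpoint, combines the two halves with one comparison, and counts (b-a) comparisons structurally.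
import Mathlib
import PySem

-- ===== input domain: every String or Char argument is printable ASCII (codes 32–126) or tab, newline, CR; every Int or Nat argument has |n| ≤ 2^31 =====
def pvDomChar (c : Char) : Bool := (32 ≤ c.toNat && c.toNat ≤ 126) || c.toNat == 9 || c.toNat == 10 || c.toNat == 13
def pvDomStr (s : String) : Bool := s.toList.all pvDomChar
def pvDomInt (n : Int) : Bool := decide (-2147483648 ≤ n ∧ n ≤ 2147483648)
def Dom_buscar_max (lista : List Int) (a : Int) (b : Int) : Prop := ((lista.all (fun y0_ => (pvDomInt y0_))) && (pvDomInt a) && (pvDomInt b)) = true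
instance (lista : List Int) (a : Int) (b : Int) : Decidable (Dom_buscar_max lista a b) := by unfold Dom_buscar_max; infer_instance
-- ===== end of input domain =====

-- B replaces A's single left-to-right scan by a midpoint divide-and-conquer recursion (alternative decomposition, same cost).

-- ===== PORT A =====
-- A's for-loop over range(a+1, b+1) carrying the state (pos_max, contar).
def buscar_max (lista : List Int) (a : Int) (b : Int) : Int × Int :=
  (PySem.List.pyRange (a + 1) (b + 1) 1).foldl
    (fun st i =>
      let contar := st.2 + 1
      let pos_max := if (PySem.List.pyGet? lista i).getD 0 > (PySem.List.pyGet? lista st.1).getD 0 then i else st.1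
      (pos_max, contar))
    (a, 0)

-- ===== PORT B =====
-- midpoint bounds, needed by the port's termination argument (cited in decreasing_by)
theorem bm_mid_bounds (lo hi : Int) (h : lo < hi) :
    lo ≤ PySem.Int.floordiv (lo + hi) 2 ∧ PySem.Int.floordiv (lo + hi) 2 < hi := by
  simp only [PySem.Int.floordiv]
  rw [show ((lo + hi).fdiv 2) = (lo + hi) / 2 by simp [Int.fdiv_eq_ediv]]
  omega

-- rec(lo, hi): split at mid = (lo+hi)//2, combine with one comparison.
def buscar_max_rec (lista : List Int) (lo hi : Int) : Int × Int :=
  if h : lo = hi then (lo, 0)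
  else if hlt : lo < hi then
    let mid := PySem.Int.floordiv (lo + hi) 2
    let L := buscar_max_rec lista lo mid
    let R := buscar_max_rec lista (mid + 1) hi
    ((if (PySem.List.pyGet? lista R.1).getD 0 > (PySem.List.pyGet? lista L.1).getD 0 then R.1 else L.1),
     L.2 + R.2 + 1)
  else (lo, 0)  -- unreachable when called with lo ≤ hi (as in Source B)
termination_by (hi - lo).toNat
decreasing_by
  · have := bm_mid_bounds lo hi hlt; omega
  · have := bm_mid_bounds lo hi hlt; omega

def buscar_max_alt (lista : List Int) (a : Int) (b : Int) : Int × Int :=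
  if b < a then (a, 0) else buscar_max_rec lista a b

-- ===== PRECONDITION & SPEC =====
-- Pre_ excludes exactly the inputs where A raises IndexError: a < b with the
-- segment [a, b] not entirely inside Python's valid index range [-len, len).
def Pre_buscar_max (lista : List Int) (a : Int) (b : Int) : Prop :=
  b ≤ a ∨ (-(lista.length : Int) ≤ a ∧ b < (lista.length : Int))
instance (lista : List Int) (a : Int) (b : Int) : Decidable (Pre_buscar_max lista a b) := by unfold Pre_buscar_max; infer_instance
def pvWitness_buscar_max : List Int × Int × Int := ([3, 7, 2, 7, 1], 1, 4)
def Spec_buscar_max (lista : List Int) (a : Int) (b : Int) (out : Int × Int) : Prop := out = buscar_max_alt lista a b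
instance (lista : List Int) (a : Int) (b : Int) (out : Int × Int) : Decidable (Spec_buscar_max lista a b out) := by unfold Spec_buscar_max; infer_instance

-- ===== CLAIM (what is proved, stated in full; the proofs are below) =====
def Claim_equal_buscar_max : Prop := ∀ (lista : List Int) (a : Int) (b : Int), Dom_buscar_max lista a b → Pre_buscar_max lista a b → Spec_buscar_max lista a b (buscar_max lista a b)

-- ===== LEMMAS AND PROOFS =====

-- the left-biased argmax combine underlying both programs
def bmComb (lista : List Int) (p q : Int) : Int :=
  if (PySem.List.pyGet? lista q).getD 0 > (PySem.List.pyGet? lista p).getD 0 then q else p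

theorem bmComb_assoc (lista : List Int) (p q r : Int) :
    bmComb lista (bmComb lista p q) r = bmComb lista p (bmComb lista q r) := by
  unfold bmComb; split_ifs <;> first | rfl | omega

-- A's fold in terms of bmComb and a length count
theorem foldA_eq (lista : List Int) (l : List Int) (p c : Int) :
    l.foldl (fun st i =>
      let contar := st.2 + 1
      let pos_max := if (PySem.List.pyGet? lista i).getD 0 > (PySem.List.pyGet? lista st.1).getD 0 then i else st.1
      (pos_max, contar)) (p, c)
    = (l.foldl (bmComb lista) p, c + l.length) := by
  induction l generalizing p c with
  | nil => simp
  | cons x xs ih => simp [List.foldl_cons, ih, bmComb]; omega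

theorem foldl_bmComb_pull (lista : List Int) (l : List Int) (p q : Int) :
    bmComb lista p (l.foldl (bmComb lista) q) = l.foldl (bmComb lista) (bmComb lista p q) := by
  induction l generalizing q with
  | nil => rfl
  | cons x xs ih => simp [List.foldl_cons, ih, bmComb_assoc]

theorem buscar_max_rec_eq (lista : List Int) (lo hi : Int) (h : lo ≤ hi) :
    buscar_max_rec lista lo hi
      = ((PySem.List.pyRange (lo + 1) (hi + 1) 1).foldl (bmComb lista) lo, hi - lo) := by
  by_cases heq : lo = hi
  · subst heq
    rw [buscar_max_rec]
    simp [PySem.List.pyRange_one_eq_nil (le_refl (lo + 1))]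
  · have hlt : lo < hi := lt_of_le_of_ne h heq
    rw [buscar_max_rec]
    simp only [heq, dif_neg, not_false_iff, hlt, dif_pos]
    set mid := PySem.Int.floordiv (lo + hi) 2 with hmid
    have hmb : lo ≤ mid ∧ mid < hi := bm_mid_bounds lo hi hlt
    have ih1 := buscar_max_rec_eq lista lo mid hmb.1
    have ih2 := buscar_max_rec_eq lista (mid + 1) hi (by omega)
    rw [ih1, ih2]
    have hsplit : PySem.List.pyRange (lo + 1) (hi + 1) 1
        = PySem.List.pyRange (lo + 1) (mid + 1) 1 ++ PySem.List.pyRange (mid + 1) (hi + 1) 1 :=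
      PySem.List.pyRange_one_append _ _ _ (by omega) (by omega)
    have hcons : PySem.List.pyRange (mid + 1) (hi + 1) 1
        = (mid + 1) :: PySem.List.pyRange (mid + 1 + 1) (hi + 1) 1 :=
      PySem.List.pyRange_one_cons (by omega)
    simp only [Prod.mk.injEq]
    refine ⟨?_, by omega⟩
    rw [hsplit, List.foldl_append, hcons, List.foldl_cons]
    exact foldl_bmComb_pull lista _ _ _
termination_by (hi - lo).toNat
decreasing_by
  all_goals (have := bm_mid_bounds lo hi hlt; omega)

-- ===== VERDICT (by name: the statement is the Claim_ definition above) =====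
theorem buscar_max_spec : Claim_equal_buscar_max := by
  intro lista a b _ _
  unfold Spec_buscar_max buscar_max buscar_max_alt
  rw [foldA_eq]
  by_cases hba : b < a
  · rw [if_pos hba, PySem.List.pyRange_one_eq_nil (by omega)]; simp
  · rw [if_neg hba, buscar_max_rec_eq lista a b (by omega)]
    simp [PySem.List.length_pyRange_one]
    omega
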